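-- pv_equiv track=rewrite | github.com/ivanpotishniy/algorithms-templates | contest/_sort_containers.py | sort_containers
-- ===== SOURCE A (Python) =====
-- def sort_containers(containers, pattern):
--     # Подсчитываем частоту каждого контейнера с помощью обычного словаря
--     freq = {}
--     for num in containers:
--         if num in freq:
--             freq[num] += 1
--         else:
--             freq[num] = 1
--
--     result = []
--
--     # Обрабатываем контейнеры в порядке шаблона
--     for num in pattern:
--         if num in freq:
--             # Добавляем все экземпляры числа num в результат
--             result.extend([num] * freq[num])
--             # Удаляем число из словаря частот, чтобы не обрабатывать его позже
--             del freq[num]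
--
--     # Оставшиеся числа (не упомянутые в шаблоне) сортируем по возрастанию
--     remaining = []
--     for num, count in freq.items():
--         # Расширяем список оставшимися числами с учётом их частоты
--         remaining.extend([num] * count)
--     # Сортируем оставшиеся числа
--     remaining.sort()
--
--     # Добавляем их в конец результата
--     result.extend(remaining)
--
--     return result
-- ===== SOURCE B (Python) =====
-- def sort_containers(containers, pattern):
--     n = len(pattern)
--     rank = {}
--     for i, v in enumerate(pattern):
--         if v not in rank:
--             rank[v] = i
--     return sorted(containers, key=lambda x: (rank.get(x, n), x))
-- ===== Notes on version B (the rewrite author's own statement) =====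
-- stated objective: idiomatic
-- what changed: Replaces the frequency-dict + manual grouping + separate leftover sort with a single stable key-based sort: a first-occurrence rank dict over the pattern and sorted(containers, key=lambda x: (rank.get(x, len(pattern)), x)).
import Mathlib
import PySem

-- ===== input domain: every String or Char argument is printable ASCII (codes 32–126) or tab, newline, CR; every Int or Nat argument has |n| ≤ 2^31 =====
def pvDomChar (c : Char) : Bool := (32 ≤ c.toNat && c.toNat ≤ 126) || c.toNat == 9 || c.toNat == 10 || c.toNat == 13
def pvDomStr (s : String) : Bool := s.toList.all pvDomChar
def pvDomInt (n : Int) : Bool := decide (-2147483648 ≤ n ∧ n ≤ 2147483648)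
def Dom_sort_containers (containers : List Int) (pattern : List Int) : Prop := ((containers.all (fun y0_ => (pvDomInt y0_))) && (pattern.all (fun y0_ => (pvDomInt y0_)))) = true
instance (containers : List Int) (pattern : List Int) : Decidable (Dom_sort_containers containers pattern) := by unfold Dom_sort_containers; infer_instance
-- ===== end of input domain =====

-- B replaces A's count-dict + manual grouping + separate leftover sort by one stable sort
-- under the key (first-occurrence rank in pattern, value); objective: idiomatic/simpler.

-- ===== PORT A =====
-- body of A's `for num in pattern:` loop, acting on the state (result, freq)
def pvStep (st : List Int × PySem.Dict Int Int) (num : Int) : List Int × PySem.Dict Int Int :=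
  if st.2.contains num then
    (st.1 ++ PySem.List.pyRepeat [num] (st.2.getD num 0), st.2.erase num)
  else st

def sort_containers (containers : List Int) (pattern : List Int) : List Int :=
  let freq : PySem.Dict Int Int := containers.foldl
    (fun freq num => if freq.contains num then freq.modify num 0 (· + 1) else freq.insert num 1)
    PySem.Dict.empty
  let st := pattern.foldl pvStep ([], freq)
  let remaining := st.2.items.foldl (fun remaining kv => remaining ++ PySem.List.pyRepeat [kv.1] kv.2) []
  st.1 ++ PySem.List.sorted remaining (fun x => x) false

-- ===== PORT B =====
-- Source B's `for i, v in enumerate(pattern): if v not in rank: rank[v] = i` loop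
def pvRankLoop (d : PySem.Dict Int Int) (i : Int) : List Int → PySem.Dict Int Int
  | [] => d
  | v :: rest => pvRankLoop (if d.contains v then d else d.insert v i) (i + 1) rest

def sort_containers_alt (containers : List Int) (pattern : List Int) : List Int :=
  let n : Int := pattern.length
  let rank := pvRankLoop PySem.Dict.empty 0 pattern
  PySem.List.sorted2 containers (fun x => rank.getD x n) (fun x => x) false

-- ===== PRECONDITION & SPEC =====
def Spec_sort_containers (containers : List Int) (pattern : List Int) (out : List Int) : Prop := out = sort_containers_alt containers pattern
instance (containers : List Int) (pattern : List Int) (out : List Int) : Decidable (Spec_sort_containers containers pattern out) := by unfold Spec_sort_containers; infer_instance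

-- ===== CLAIM (what is proved, stated in full; the proofs are below) =====
def Claim_equal_sort_containers : Prop := ∀ (containers : List Int) (pattern : List Int), Dom_sort_containers containers pattern → Spec_sort_containers containers pattern (sort_containers containers pattern)

-- ===== LEMMAS AND PROOFS =====

-- B's rank-or-length key, and the lexicographic ordering key (rank, value)
def pvR (p : List Int) (x : Int) : Int := (pvRankLoop PySem.Dict.empty 0 p).getD x (p.length : Int)

def pvKey (p : List Int) (x : Int) : Lex (Int × Int) := toLex (pvR p x, x)

-- closed form of A's pattern loop: values grouped in order of first occurrence
def pvGroups (c : List Int) : List Int → List Int → List Int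
  | _, [] => []
  | pre, v :: q' =>
      if pre.contains v || !c.contains v then pvGroups c (pre ++ [v]) q'
      else List.replicate (c.count v) v ++ pvGroups c (pre ++ [v]) q'

lemma pvRankLoop_get? (q : List Int) : ∀ (d : PySem.Dict Int Int) (i v : Int),
    (pvRankLoop d i q).get? v =
      if d.contains v then d.get? v else (PySem.List.index? q v).map (fun k => i + (k : Int)) := by
  induction q with
  | nil =>
    intro d i v
    by_cases h : d.contains v
    · simp [pvRankLoop, h]
    · simp only [pvRankLoop, h, Bool.false_eq_true, if_false]
      rw [(PySem.Dict.get?_eq_none_iff_contains d v).mpr (by simpa using h)]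
      simp [PySem.List.index?]
  | cons u q ih =>
    intro d i v
    simp only [pvRankLoop]
    rw [ih]
    by_cases hc : d.contains v
    · by_cases hu : d.contains u
      · simp [hu, hc]
      · have hvu : v ≠ u := by intro e; rw [e] at hc; exact absurd hc (by simp [hu])
        simp [hu, PySem.Dict.contains_insert, hvu, hc, PySem.Dict.get?_insert_of_ne _ _ hvu]
    · by_cases hu : d.contains u
      · have huv : u ≠ v := by intro e; rw [e] at hu; exact absurd hu (by simp [hc])
        rw [PySem.List.index?_cons_of_ne _ huv]
        simp only [hu, if_true, hc, Bool.false_eq_true, if_false]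
        cases PySem.List.index? q v <;> simp <;> push_cast <;> ring
      · by_cases hvu : v = u
        · have hcu : d.contains u = false := by rw [← hvu]; simpa using hc
          rw [hvu, PySem.List.index?_cons_self]
          simp only [hcu, Bool.false_eq_true, if_false]
          have hci : ((d.insert u i).contains u) = true := by simp [PySem.Dict.contains_insert]
          simp [hci, PySem.Dict.get?_insert_self]
        · rw [PySem.List.index?_cons_of_ne _ (Ne.symm hvu)]
          simp only [hu, Bool.false_eq_true, if_false, PySem.Dict.contains_insert]
          have hb : (v == u) = false := by simp [hvu]
          simp only [hb, Bool.false_or, hc, Bool.false_eq_true, if_false,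
            PySem.Dict.get?_insert_of_ne _ _ hvu]
          cases PySem.List.index? q v <;> simp <;> push_cast <;> ring

lemma pvR_eq (p : List Int) (v : Int) :
    pvR p v = ((PySem.List.index? p v).map (fun k => (k : Int))).getD (p.length : Int) := by
  unfold pvR
  rw [PySem.Dict.getD_eq_get?_getD, pvRankLoop_get?]
  simp only [PySem.Dict.contains_empty, Bool.false_eq_true, if_false]
  cases PySem.List.index? p v <;> simp

lemma pvR_of_not_mem {p : List Int} {v : Int} (h : v ∉ p) : pvR p v = (p.length : Int) := by
  rw [pvR_eq, (PySem.List.index?_eq_none_iff p v).mpr h]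
  rfl

lemma pvR_lt_of_mem {p : List Int} {v : Int} (h : v ∈ p) : pvR p v < (p.length : Int) := by
  obtain ⟨k, hk⟩ : ∃ k, PySem.List.index? p v = some k :=
    Option.isSome_iff_exists.mp ((PySem.List.index?_isSome_iff p v).mpr h)
  obtain ⟨hlt, -, -⟩ := PySem.List.getElem_of_index?_eq_some hk
  rw [pvR_eq, hk]
  simpa using hlt

lemma pvIndex?_append_of_not_mem {v : Int} (pre : List Int) (t : List Int) (h : v ∉ pre) :
    PySem.List.index? (pre ++ t) v = (PySem.List.index? t v).map (· + pre.length) := by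
  induction pre with
  | nil =>
    simp only [List.nil_append, List.length_nil]
    cases h' : PySem.List.index? t v <;> simp
  | cons a pre ih =>
    have hav : a ≠ v := by intro e; exact h (by simp [e])
    have h' : v ∉ pre := fun hm => h (List.mem_cons_of_mem _ hm)
    rw [List.cons_append, PySem.List.index?_cons_of_ne _ hav, ih h']
    cases PySem.List.index? t v <;> simp <;> omega

lemma pvKey_le_of_lt {p : List Int} {a b : Int} (h : pvR p a < pvR p b) : pvKey p a ≤ pvKey p b := by
  apply le_of_lt
  rw [pvKey, pvKey, Prod.Lex.lt_iff]
  simpa using Or.inl h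

lemma pvKey_injective (p : List Int) : Function.Injective (pvKey p) := by
  intro a b hab
  have := congrArg (fun t => (ofLex t).2) hab
  simpa [pvKey] using this

lemma pvGroups_mem (c : List Int) : ∀ (q pre : List Int) (z : Int),
    z ∈ pvGroups c pre q → z ∈ q ∧ z ∉ pre ∧ z ∈ c := by
  intro q
  induction q with
  | nil => simp [pvGroups]
  | cons v q' ih =>
    intro pre z hz
    simp only [pvGroups] at hz
    by_cases hcond : (pre.contains v || !c.contains v) = true
    · rw [if_pos hcond] at hz
      obtain ⟨h1, h2, h3⟩ := ih _ _ hz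
      exact ⟨List.mem_cons_of_mem _ h1, fun hp => h2 (by simp [hp]), h3⟩
    · rw [if_neg hcond] at hz
      have hc' : v ∉ pre ∧ v ∈ c := by
        simp only [Bool.or_eq_true, Bool.not_eq_true', not_or] at hcond
        constructor
        · intro hm; exact hcond.1 (by simp [hm])
        · have := hcond.2; simp only [Bool.not_eq_false] at this; simpa using this
      rcases List.mem_append.mp hz with hrep | hrest
      · have hzv := List.eq_of_mem_replicate hrep
        subst hzv
        exact ⟨by simp, hc'.1, hc'.2⟩
      · obtain ⟨h1, h2, h3⟩ := ih _ _ hrest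
        exact ⟨List.mem_cons_of_mem _ h1, fun hp => h2 (by simp [hp]), h3⟩

lemma pvGroups_pairwise (c p : List Int) : ∀ (q pre : List Int), p = pre ++ q →
    List.Pairwise (fun a b => pvKey p a ≤ pvKey p b) (pvGroups c pre q) := by
  intro q
  induction q with
  | nil => intro pre hp; simp [pvGroups]
  | cons v q' ih =>
    intro pre hp
    simp only [pvGroups]
    by_cases hcond : (pre.contains v || !c.contains v) = true
    · rw [if_pos hcond]; exact ih (pre ++ [v]) (by simp [hp])
    · rw [if_neg hcond]
      have hvpre : v ∉ pre := by
        simp only [Bool.or_eq_true, not_or] at hcond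
        intro hm; exact hcond.1 (by simp [hm])
      have hrank_v : pvR p v = (pre.length : Int) := by
        have hidx : PySem.List.index? p v = some pre.length := by
          rw [hp, pvIndex?_append_of_not_mem _ _ hvpre, PySem.List.index?_cons_self]
          simp
        rw [pvR_eq, hidx]
        rfl
      rw [List.pairwise_append]
      refine ⟨List.pairwise_replicate.mpr (Or.inr le_rfl), ih (pre ++ [v]) (by simp [hp]), ?_⟩
      intro a ha b hb
      have hav := List.eq_of_mem_replicate ha
      rw [hav]
      obtain ⟨hbq, hbpre, -⟩ := pvGroups_mem c q' (pre ++ [v]) b hb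
      have hbv : b ≠ v := fun e => hbpre (by simp [e])
      have hbpre' : b ∉ pre := fun e => hbpre (by simp [e])
      apply pvKey_le_of_lt
      obtain ⟨k, hk⟩ : ∃ k, PySem.List.index? q' b = some k :=
        Option.isSome_iff_exists.mp ((PySem.List.index?_isSome_iff q' b).mpr hbq)
      have hidx : PySem.List.index? p b = some (k + 1 + pre.length) := by
        rw [hp, pvIndex?_append_of_not_mem _ _ hbpre',
          PySem.List.index?_cons_of_ne _ (Ne.symm hbv), hk]
        rfl
      have hv2 : pvR p b = ((k + 1 + pre.length : Nat) : Int) := by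
        rw [pvR_eq, hidx]; rfl
      rw [hrank_v, hv2]
      push_cast
      omega

lemma pvGroups_count (c : List Int) (w : Int) : ∀ (q pre : List Int),
    List.count w (pvGroups c pre q) =
      if w ∈ q ∧ w ∉ pre ∧ w ∈ c then List.count w c else 0 := by
  intro q
  induction q with
  | nil => intro pre; simp [pvGroups]
  | cons v q' ih =>
    intro pre
    simp only [pvGroups]
    by_cases hcond : (pre.contains v || !c.contains v) = true
    · rw [if_pos hcond, ih]
      have hside : v ∈ pre ∨ v ∉ c := by
        rcases Bool.or_eq_true_iff.mp hcond with h | h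
        · left; simpa using h
        · right; simp only [Bool.not_eq_true'] at h; simpa using h
      by_cases hwv : w = v
      · subst hwv
        have h1 : ¬(w ∈ q' ∧ w ∉ pre ++ [w] ∧ w ∈ c) := by simp
        have h2 : ¬(w ∈ w :: q' ∧ w ∉ pre ∧ w ∈ c) := by
          rintro ⟨-, hp2, hp3⟩
          rcases hside with h | h
          exacts [hp2 h, h hp3]
        rw [if_neg h1, if_neg h2]
      · by_cases hq : w ∈ q' <;> by_cases hpre : w ∈ pre <;> by_cases hc' : w ∈ c <;>
          simp [hwv, hq, hpre, hc', List.mem_append, List.mem_cons]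
    · rw [if_neg hcond, List.count_append, ih]
      have hside : v ∉ pre ∧ v ∈ c := by
        simp only [Bool.or_eq_true, Bool.not_eq_true', not_or] at hcond
        constructor
        · intro hm; exact hcond.1 (by simp [hm])
        · have := hcond.2; simp only [Bool.not_eq_false] at this; simpa using this
      by_cases hwv : w = v
      · subst hwv
        have h1 : ¬(w ∈ q' ∧ w ∉ pre ++ [w] ∧ w ∈ c) := by simp
        have h2 : w ∈ w :: q' ∧ w ∉ pre ∧ w ∈ c := ⟨by simp, hside.1, hside.2⟩
        rw [if_neg h1, if_pos h2, List.count_replicate]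
        try simp
      · rw [List.count_replicate, if_neg (by simp [Ne.symm hwv])]
        by_cases hq : w ∈ q' <;> by_cases hpre : w ∈ pre <;> by_cases hc' : w ∈ c <;>
          simp [hwv, hq, hpre, hc', List.mem_append, List.mem_cons]

lemma pvFindErase (l : List (Int × Int)) (k w : Int) :
    (l.filter (fun p => !(p.1 == k))).find? (fun p => p.1 == w) =
      if w = k then none else l.find? (fun p => p.1 == w) := by
  induction l with
  | nil => by_cases h : w = k <;> simp [h]
  | cons a t ih =>
    simp only [List.filter_cons]
    by_cases hak : a.1 = k
    · simp only [hak, beq_self_eq_true, Bool.not_true, Bool.false_eq_true, if_false]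
      rw [ih]
      by_cases h : w = k
      · simp [h]
      · rw [if_neg h, if_neg h,
          List.find?_cons_of_neg (by simp [hak]; exact fun e => h e.symm)]
    · have hbk : (a.1 == k) = false := by simp [hak]
      simp only [hbk, Bool.not_false, if_true]
      by_cases haw : a.1 = w
      · have hwk : w ≠ k := fun e => hak (haw.trans e)
        rw [if_neg hwk, List.find?_cons_of_pos (by simp [haw]),
          List.find?_cons_of_pos (by simp [haw])]
      · rw [List.find?_cons_of_neg (by simp [haw]), ih]
        by_cases h : w = k
        · simp [h]
        · rw [if_neg h, if_neg h, List.find?_cons_of_neg (by simp [haw])]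

lemma pvDict_get?_erase (d : PySem.Dict Int Int) (k w : Int) :
    (d.erase k).get? w = if w = k then none else d.get? w := by
  simp only [PySem.Dict.erase, PySem.Dict.get?]
  rw [show (fun x : Int × Int => x.2) = Prod.snd from rfl]
  by_cases h : w = k
  · simp [h, pvFindErase]
  · rw [pvFindErase, if_neg h, if_neg h]

lemma pvDict_nodup_erase {d : PySem.Dict Int Int} (k : Int) (h : d.keys.Nodup) :
    (d.erase k).keys.Nodup := by
  simp only [PySem.Dict.keys, PySem.Dict.erase] at *
  exact List.Nodup.sublist (List.filter_sublist.map _) h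

lemma pvCounter_nodup (c : List Int) : (PySem.Dict.counter c).keys.Nodup := by
  rw [PySem.Dict.counter_eq_foldl]
  exact PySem.Dict.nodup_keys_foldl_modify_key c (fun x => x) 0 (fun _ _ v => v + 1) _
    (by simp [PySem.Dict.keys, PySem.Dict.empty])

lemma pvFreq_eq_counter (c : List Int) :
    c.foldl (fun freq num => if freq.contains num then freq.modify num 0 (· + 1) else freq.insert num 1)
      PySem.Dict.empty = PySem.Dict.counter c := by
  rw [PySem.Dict.counter_eq_foldl]
  congr 1
  funext d num
  by_cases h : d.contains num
  · simp [h]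
  · have h0 : d.getD num 0 = 0 :=
      PySem.Dict.getD_of_get?_eq_none d 0 ((PySem.Dict.get?_eq_none_iff_contains d num).mpr
        (by simpa using h))
    simp only [h, Bool.false_eq_true, if_false, PySem.Dict.modify, h0, zero_add]

lemma pvALoop (c : List Int) : ∀ (q : List Int) (res : List Int) (d : PySem.Dict Int Int) (pre : List Int),
    (∀ v, d.get? v = if v ∈ pre then none else (PySem.Dict.counter c).get? v) →
    d.keys.Nodup →
    (q.foldl pvStep (res, d)).1 = res ++ pvGroups c pre q
    ∧ (∀ v, (q.foldl pvStep (res, d)).2.get? v =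
        if v ∈ pre ++ q then none else (PySem.Dict.counter c).get? v)
    ∧ (q.foldl pvStep (res, d)).2.keys.Nodup := by
  intro q
  induction q with
  | nil =>
    intro res d pre hinv hnd
    refine ⟨by simp [pvGroups], ?_, hnd⟩
    simpa using hinv
  | cons v q' ih =>
    intro res d pre hinv hnd
    simp only [List.foldl_cons]
    by_cases hc : d.contains v
    · have hvpre : v ∉ pre := by
        intro hp
        have h := hinv v
        rw [if_pos hp] at h
        rw [PySem.Dict.contains_eq_isSome_get?, h] at hc
        simp at hc
      obtain ⟨val, hval⟩ : ∃ val, (PySem.Dict.counter c).get? v = some val := by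
        have h := hinv v
        rw [if_neg hvpre] at h
        rw [PySem.Dict.contains_eq_isSome_get?, h] at hc
        exact Option.isSome_iff_exists.mp hc
      have hvc : v ∈ c := by
        have hcc : (PySem.Dict.counter c).contains v = true := by
          rw [PySem.Dict.contains_eq_isSome_get?, hval]; rfl
        rw [PySem.Dict.contains_counter] at hcc
        simpa using hcc
      have hgv : d.getD v 0 = (List.count v c : Int) := by
        have h1 : d.getD v 0 = val := by
          rw [PySem.Dict.getD_eq_get?_getD, hinv v, if_neg hvpre, hval]; rfl
        have h2 := PySem.Dict.getD_counter c v
        rw [PySem.Dict.getD_eq_get?_getD, hval] at h2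
        simp only [Option.getD_some] at h2
        rw [h1, ← h2]
      have hstep : pvStep (res, d) v = (res ++ List.replicate (List.count v c) v, d.erase v) := by
        simp [pvStep, hc, hgv, PySem.List.pyRepeat_singleton]
      rw [hstep]
      have hinv' : ∀ w, (d.erase v).get? w =
          if w ∈ pre ++ [v] then none else (PySem.Dict.counter c).get? w := by
        intro w
        rw [pvDict_get?_erase]
        by_cases hwv : w = v
        · simp [hwv]
        · rw [if_neg hwv, hinv w]
          by_cases hwp : w ∈ pre <;> simp [hwp, hwv, List.mem_append]
      obtain ⟨h1, h2, h3⟩ := ih (res ++ List.replicate (List.count v c) v) (d.erase v)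
        (pre ++ [v]) hinv' (pvDict_nodup_erase v hnd)
      have hcnd : (pre.contains v || !c.contains v) = false := by
        simp [hvpre, hvc]
      refine ⟨?_, ?_, h3⟩
      · rw [h1]
        simp only [pvGroups, hcnd, Bool.false_eq_true, if_false, List.append_assoc]
        try rfl
      · intro w
        rw [h2 w]
        apply if_congr _ rfl rfl
        simp [List.mem_append, List.mem_cons]
        try tauto
    · have hnone : d.get? v = none :=
        (PySem.Dict.get?_eq_none_iff_contains d v).mpr (by simpa using hc)
      have hside : v ∈ pre ∨ (PySem.Dict.counter c).get? v = none := by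
        by_cases hp : v ∈ pre
        · exact Or.inl hp
        · right
          have h := hinv v
          rw [if_neg hp] at h
          rw [← h]
          exact hnone
      have hstep : pvStep (res, d) v = (res, d) := by simp [pvStep, hc]
      rw [hstep]
      have hinv' : ∀ w, d.get? w =
          if w ∈ pre ++ [v] then none else (PySem.Dict.counter c).get? w := by
        intro w
        by_cases hwv : w = v
        · subst hwv
          rw [if_pos (by simp)]
          exact hnone
        · rw [hinv w]
          apply if_congr _ rfl rfl
          simp [List.mem_append, hwv]
      obtain ⟨h1, h2, h3⟩ := ih res d (pre ++ [v]) hinv' hnd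
      have hcnd : (pre.contains v || !c.contains v) = true := by
        rcases hside with h | h
        · simp [h]
        · have hcc : (PySem.Dict.counter c).contains v = false := by
            rw [PySem.Dict.contains_eq_isSome_get?, h]; rfl
          rw [PySem.Dict.contains_counter] at hcc
          have hnc : v ∉ c := by simpa using hcc
          simp [hnc]
      refine ⟨?_, ?_, h3⟩
      · rw [h1]
        try simp only [pvGroups, hcnd, if_true]
      · intro w
        rw [h2 w]
        apply if_congr _ rfl rfl
        simp [List.mem_append, List.mem_cons]
        try tauto

lemma pvFlatCount (w : Int) : ∀ (l : List (Int × Int)), (l.map Prod.fst).Nodup →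
    List.count w (l.flatMap (fun kv => List.replicate kv.2.toNat kv.1)) =
      (((l.find? (fun p => p.1 == w)).map Prod.snd).getD 0).toNat := by
  intro l
  induction l with
  | nil => simp
  | cons kv t ih =>
    intro hnd
    simp only [List.map_cons] at hnd
    have hnd' := hnd.of_cons
    have hhead : kv.1 ∉ t.map Prod.fst := by
      intro hm
      exact (List.nodup_cons.mp hnd).1 hm
    rw [List.flatMap_cons, List.count_append]
    by_cases h : kv.1 = w
    · rw [List.find?_cons_of_pos (by simp [h])]
      have hz : List.count w (t.flatMap (fun kv => List.replicate kv.2.toNat kv.1)) = 0 := by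
        rw [ih hnd']
        have : t.find? (fun p => p.1 == w) = none := by
          rw [List.find?_eq_none]
          intro p hp hb
          exact hhead (h ▸ (by simpa using hb : p.1 = w) ▸ List.mem_map_of_mem hp)
        rw [this]
        rfl
      rw [hz, List.count_replicate, if_pos (by simp [h])]
      simp
    · rw [List.find?_cons_of_neg (by simp [h]), List.count_replicate, if_neg (by simp [h]),
        ih hnd']
      simp

lemma pvRemaining_count (d : PySem.Dict Int Int) (hn : d.keys.Nodup) (w : Int) :
    List.count w (d.items.foldl (fun remaining kv => remaining ++ PySem.List.pyRepeat [kv.1] kv.2) []) =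
      (d.getD w 0).toNat := by
  rw [PySem.List.foldl_append_eq_flatMap]
  simp only [List.nil_append, PySem.List.pyRepeat_singleton]
  rw [pvFlatCount w d.items (by simpa [PySem.Dict.keys] using hn)]
  rw [PySem.Dict.getD_eq_get?_getD]
  rfl

lemma pvRemaining_mem {d : PySem.Dict Int Int} (hn : d.keys.Nodup) {z : Int}
    (hz : z ∈ d.items.foldl (fun remaining kv => remaining ++ PySem.List.pyRepeat [kv.1] kv.2) []) :
    ∃ v, d.get? z = some v := by
  rw [PySem.List.foldl_append_eq_flatMap] at hz
  simp only [List.nil_append, List.mem_flatMap, PySem.List.pyRepeat_singleton] at hz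
  obtain ⟨kv, hkv, hzkv⟩ := hz
  have hzv := List.eq_of_mem_replicate hzkv
  subst hzv
  exact ⟨kv.2, PySem.Dict.get?_of_mem_items d hkv hn⟩

lemma pvSorted2_eq_sorted_lex (xs : List Int) (k1 k2 : Int → Int) :
    PySem.List.sorted2 xs k1 k2 false =
      PySem.List.sorted xs (fun x => (toLex (k1 x, k2 x) : Lex (Int × Int))) false := by
  simp only [PySem.List.sorted2, PySem.List.sorted, Bool.false_eq_true, if_false]
  congr 1
  funext acc x
  congr 1
  funext a b
  rw [Bool.eq_iff_iff]
  simp only [Bool.or_eq_true, Bool.and_eq_true, Bool.not_eq_true', decide_eq_true_eq,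
    decide_eq_false_iff_not, Prod.Lex.lt_iff, ofLex_toLex]
  omega

-- ===== VERDICT (by name: the statement is the Claim_ definition above) =====
theorem sort_containers_spec : Claim_equal_sort_containers := by
  intro c p _
  unfold Spec_sort_containers
  have hinv0 : ∀ v, (PySem.Dict.counter c).get? v =
      if v ∈ ([] : List Int) then none else (PySem.Dict.counter c).get? v := by simp
  obtain ⟨h1, h2, h3⟩ := pvALoop c p [] (PySem.Dict.counter c) [] hinv0 (pvCounter_nodup c)
  have hnotp : ∀ z, z ∈ (p.foldl pvStep ([], PySem.Dict.counter c)).2.items.foldl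
      (fun remaining kv => remaining ++ PySem.List.pyRepeat [kv.1] kv.2) [] → z ∉ p := by
    intro z hz hzp
    obtain ⟨va, hva⟩ := pvRemaining_mem h3 hz
    have h := h2 z
    rw [hva, if_pos (by simpa using hzp)] at h
    simp at h
  have hA : sort_containers c p =
      pvGroups c [] p ++ PySem.List.sorted
        ((p.foldl pvStep ([], PySem.Dict.counter c)).2.items.foldl
          (fun remaining kv => remaining ++ PySem.List.pyRepeat [kv.1] kv.2) []) (fun x => x) false := by
    simp only [sort_containers, pvFreq_eq_counter]
    rw [h1]
    simp
  have hB : sort_containers_alt c p =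
      PySem.List.sorted c (fun x => (toLex (pvR p x, x) : Lex (Int × Int))) false := by
    simp only [sort_containers_alt]
    rw [pvSorted2_eq_sorted_lex]
    rfl
  have hpermA : (sort_containers c p).Perm c := by
    rw [hA, List.perm_iff_count]
    intro w
    rw [List.count_append,
      (PySem.List.sorted_perm _ (fun x => x) false).count_eq,
      pvRemaining_count _ h3 w, pvGroups_count]
    have hD : (p.foldl pvStep ([], PySem.Dict.counter c)).2.getD w 0 =
        if w ∈ p then 0 else (List.count w c : Int) := by
      rw [PySem.Dict.getD_eq_get?_getD, h2 w]
      by_cases hwp : w ∈ p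
      · simp [hwp]
      · rw [if_neg (by simpa using hwp), if_neg hwp]
        have h4 := PySem.Dict.getD_counter c w
        rw [PySem.Dict.getD_eq_get?_getD] at h4
        exact h4
    rw [hD]
    by_cases hwp : w ∈ p <;> by_cases hwc : w ∈ c <;>
      simp [hwp, hwc, List.count_eq_zero.mpr] <;> omega
  have hpermB : (sort_containers_alt c p).Perm c := by
    simp only [sort_containers_alt]
    exact PySem.List.sorted2_perm c _ _ false
  have hpwA : List.Pairwise (fun a b => pvKey p a ≤ pvKey p b) (sort_containers c p) := by
    rw [hA, List.pairwise_append]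
    refine ⟨pvGroups_pairwise c p p [] rfl, ?_, ?_⟩
    · apply List.Pairwise.imp_of_mem ?_ (PySem.List.sorted_pairwise _ (fun x => x))
      intro a b ha hb hab
      have hna : a ∉ p := hnotp a ((PySem.List.mem_sorted _ _ false a).mp ha)
      have hnb : b ∉ p := hnotp b ((PySem.List.mem_sorted _ _ false b).mp hb)
      rw [pvKey, pvKey, Prod.Lex.le_iff]
      right
      simp only [ofLex_toLex]
      exact ⟨by rw [pvR_of_not_mem hna, pvR_of_not_mem hnb], hab⟩
    · intro a ha b hb
      obtain ⟨hap, -, -⟩ := pvGroups_mem c p [] a ha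
      have hnb : b ∉ p := hnotp b ((PySem.List.mem_sorted _ _ false b).mp hb)
      exact pvKey_le_of_lt (by rw [pvR_of_not_mem hnb]; exact pvR_lt_of_mem hap)
  have hpwB : List.Pairwise (fun a b => pvKey p a ≤ pvKey p b) (sort_containers_alt c p) := by
    rw [hB]
    exact PySem.List.sorted_pairwise c _
  exact PySem.List.eq_of_perm_of_pairwise_le_of_injective (pvKey p) (pvKey_injective p)
    (hpermA.trans hpermB.symm) hpwA hpwB
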